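-- pv_equiv track=rewrite | github.com/ufal/legros-paper | intrinsic-segmentation-eval/eval_boundary_precision.py | get_boundary_indices
-- ===== SOURCE A (Python) =====
-- SEP = " "
--
-- def get_boundary_indices(segments):
--     boundaries = []
--     j = 0
--
--     for i in range(len(segments)):
--         if segments[i] == SEP:
--             boundaries.append(j)
--         else:
--             # only increment i when not on boundary
--             j += 1
--
--     len_after_sep_rem = len("".join(segments.split(SEP)))
--     assert j == len_after_sep_rem, f"{segments}, {j}, {len_after_sep_rem}, {str(boundaries)}"
--
--     return boundaries
-- ===== SOURCE B (Python) =====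
-- SEP = " "
--
-- def get_boundary_indices(segments):
--     # boundary value of the k-th separator at absolute position i is i - k
--     spaces = [i for i, c in enumerate(segments) if c == SEP]
--     return [i - k for k, i in enumerate(spaces)]
-- ===== Notes on version B (the rewrite author's own statement) =====
-- stated objective: simpler
-- what changed: Replaces the running non-space counter (and the inert assertion) by index arithmetic: the k-th separator at absolute position i contributes i - k, computed with two comprehensions over enumerate.
import Mathlib
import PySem

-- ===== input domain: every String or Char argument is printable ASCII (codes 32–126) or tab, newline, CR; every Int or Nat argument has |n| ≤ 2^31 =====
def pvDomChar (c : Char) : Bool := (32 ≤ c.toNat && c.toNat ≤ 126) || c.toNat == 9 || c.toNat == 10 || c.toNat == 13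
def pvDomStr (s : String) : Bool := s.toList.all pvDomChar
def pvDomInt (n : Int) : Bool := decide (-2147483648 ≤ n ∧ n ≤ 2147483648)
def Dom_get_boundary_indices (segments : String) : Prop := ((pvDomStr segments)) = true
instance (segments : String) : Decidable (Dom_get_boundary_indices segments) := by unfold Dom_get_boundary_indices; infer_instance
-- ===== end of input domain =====

-- B replaces A's running non-space counter by index arithmetic (k-th space at position i ↦ i - k); same O(n), simpler.
-- ===== PORT A =====
-- Loop over range(len(segments)) reading segments[i] in order = fold over the character list with state (boundaries, j).
-- The final assert in A always holds (j ends as the count of non-separator characters), so it is inert and not ported.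
def get_boundary_indices (segments : String) : List Int :=
  (segments.toList.foldl
    (fun (st : List Int × Int) c =>
      if c = ' ' then (st.1 ++ [st.2], st.2) else (st.1, st.2 + 1))
    ([], 0)).1

-- ===== PORT B =====
def get_boundary_indices_alt (segments : String) : List Int :=
  let spaces : List Int :=
    (PySem.List.enumerate segments.toList).filterMap
      (fun p => if p.2 = ' ' then some p.1 else none)
  (PySem.List.enumerate spaces).map (fun p => p.2 - p.1)

-- ===== PRECONDITION & SPEC =====
def Spec_get_boundary_indices (segments : String) (out : List Int) : Prop := out = get_boundary_indices_alt segments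
instance (segments : String) (out : List Int) : Decidable (Spec_get_boundary_indices segments out) := by unfold Spec_get_boundary_indices; infer_instance

-- ===== CLAIM (what is proved, stated in full; the proofs are below) =====
def Claim_equal_get_boundary_indices : Prop := ∀ (segments : String), Dom_get_boundary_indices segments → Spec_get_boundary_indices segments (get_boundary_indices segments)

-- ===== LEMMAS AND PROOFS =====
-- pvG l i s: boundaries emitted while scanning l, with i the absolute index and s the spaces seen so far.
def pvG : List Char → Int → Int → List Int
  | [], _, _ => []
  | c :: l, i, s => if c = ' ' then (i - s) :: pvG l (i+1) (s+1) else pvG l (i+1) s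

-- pvSp l i: absolute positions of the spaces of l, scanning from index i.
def pvSp : List Char → Int → List Int
  | [], _ => []
  | c :: l, i => if c = ' ' then i :: pvSp l (i+1) else pvSp l (i+1)

lemma pvA_fold (l : List Char) (acc : List Int) (i s : Int) :
    (l.foldl
      (fun (st : List Int × Int) c =>
        if c = ' ' then (st.1 ++ [st.2], st.2) else (st.1, st.2 + 1))
      (acc, i - s)).1 = acc ++ pvG l i s := by
  induction l generalizing acc i s with
  | nil => simp [pvG]
  | cons c l ih =>
    by_cases h : c = ' '
    · have h1 := ih (acc ++ [i - s]) (i+1) (s+1)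
      simp [List.foldl, h, pvG] at h1 ⊢
      exact h1
    · have h1 := ih acc (i+1) s
      simp [List.foldl, h, pvG] at h1 ⊢
      rw [show i - s + 1 = i + 1 - s by ring, h1]

lemma pvB_sp (l : List Char) (i : Int) :
    (PySem.List.enumerate l i).filterMap
      (fun p => if p.2 = ' ' then some p.1 else none) = pvSp l i := by
  induction l generalizing i with
  | nil => simp [pvSp, PySem.List.enumerate_nil]
  | cons c l ih =>
    by_cases h : c = ' ' <;>
      simp [PySem.List.enumerate_cons, h, pvSp, ih]

lemma pvB_map (l : List Char) (i s : Int) :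
    (PySem.List.enumerate (pvSp l i) s).map (fun p => p.2 - p.1) = pvG l i s := by
  induction l generalizing i s with
  | nil => simp [pvSp, pvG, PySem.List.enumerate_nil]
  | cons c l ih =>
    by_cases h : c = ' ' <;>
      simp [pvSp, pvG, h, PySem.List.enumerate_cons, ih]

-- ===== VERDICT (by name: the statement is the Claim_ definition above) =====
theorem get_boundary_indices_spec : Claim_equal_get_boundary_indices := by
  intro segments _
  unfold Spec_get_boundary_indices get_boundary_indices get_boundary_indices_alt
  rw [pvB_sp, pvB_map]
  have h := pvA_fold segments.toList [] 0 0
  simpa using h
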